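-- pv_equiv track=rewrite | github.com/HerculeWu/Physics718 | exercise01/exercise01_homework.py | odd_fibonacci_numbers
-- ===== SOURCE A (Python) =====
-- def odd_fibonacci_numbers(n_numbers):
--     """
--     Return a list of the first N odd fibonacci numbers
--     """
--     '''
--     We can see that only odd number + even number = odd number
--     (odd + odd = even, even + even = even)
--     recall for fibonacci seq. n = 1, 2 x_1, x_2=1,1 both odd
--     so x_3 is a even number and due to
--     x_n = x_(n-1) + x_(n-2),
--     we find x_4 is odd, x_5 is odd, x_6 is even, x_7 is odd ...
--     finally, we find that we can decompose the whole seq into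
--     (odd, odd, even) tuple.
--     So for first n_numbers odd terms we need to compute N terms
--     1. if n_numbes % 2 == 0, we need to compute
--        N = (n_numbers // 2) * 3 terms
--     2. else we need to compute
--        N = (n_numbers // 2 + 1) * 3 terms
--     then for n-th term x_n, if n%3 == 1 or 2, x_n is odd
--     else x_n is even (actually n%3 can only be 0, 1, 2)
--     '''
--     res = []
--     # #fibnacci number we need to compute
--     N = 0
--     if n_numbers % 2 == 0:
--         N = (n_numbers // 2) * 3
--     else:
--         N = (n_numbers // 2 + 1) * 3
--     fibs = fibonacci_seq_n(N)
--     for n in range(1, N+1):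
--         if not n % 3 == 0:
--             res.append(fibs[n-1])
--     # if n_numbers % 2 != 0, we actually have one more term
--     return res[:n_numbers]
--
-- def fibonacci_seq_n(number):
--     """
--     return a list of fibonacci seq. contains `number` terms
--     """
--     if number == 1:
--         return [1]
--     if number == 2:
--         return [1, 1]
--     fibs = [1, 1]
--     for i in range(2, number):
--         fibs.append(fibs[-1] + fibs[-2])
--     return fibs
-- ===== SOURCE B (Python) =====
-- def odd_fibonacci_numbers(n_numbers):
--     """Return a list of the first N odd fibonacci numbers."""
--     # Odd Fibonacci numbers come in adjacent pairs (F_{3k+1}, F_{3k+2});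
--     # from one such pair (a, b) the next is (a + 2*b, 2*a + 3*b).
--     res = []
--     a, b = 1, 1
--     while len(res) < n_numbers:
--         res.append(a)
--         if len(res) < n_numbers:
--             res.append(b)
--         a, b = a + 2 * b, 2 * a + 3 * b
--     return res
-- ===== Notes on version B (the rewrite author's own statement) =====
-- stated objective: simpler
-- what changed: B generates odd Fibonacci numbers directly with a stride-3 pair recurrence ((a,b) -> (a+2b, 2a+3b)), appending until the result has n entries, instead of A's precomputing a fixed-length Fibonacci list, filtering by position mod 3 and slicing.
import Mathlib
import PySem

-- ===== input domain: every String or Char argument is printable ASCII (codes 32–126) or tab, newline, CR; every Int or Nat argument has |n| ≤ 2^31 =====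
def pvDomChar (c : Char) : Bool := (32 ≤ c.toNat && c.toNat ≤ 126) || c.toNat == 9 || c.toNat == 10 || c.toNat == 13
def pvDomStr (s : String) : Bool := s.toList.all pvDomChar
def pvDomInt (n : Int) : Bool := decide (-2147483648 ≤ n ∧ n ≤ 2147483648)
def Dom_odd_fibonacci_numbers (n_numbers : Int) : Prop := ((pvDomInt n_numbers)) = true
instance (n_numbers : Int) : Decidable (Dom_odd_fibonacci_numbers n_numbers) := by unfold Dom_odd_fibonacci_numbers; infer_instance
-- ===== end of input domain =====

-- B replaces A's precompute/position-filter/slice pipeline by direct generation of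
-- odd Fibonacci numbers via a stride-3 pair recurrence; simpler, same O(n) cost.

-- ===== PORT A =====
-- fibs[-1] / fibs[-2]: the list always has ≥ 2 elements here, so Python never raises;
-- `.getD 0` is only a type-level default for the unreachable `none`.
def fibonacci_seq_n (number : Int) : List Int :=
  if number = 1 then [1]
  else if number = 2 then [1, 1]
  else
    (PySem.List.pyRange 2 number 1).foldl
      (fun fibs _i =>
        fibs ++ [(PySem.List.pyGet? fibs (-1)).getD 0 + (PySem.List.pyGet? fibs (-2)).getD 0])
      [1, 1]

-- fibs[n-1]: n ranges over 1..N and fibs has ≥ N elements, so Python never raises.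
def odd_fibonacci_numbers (n_numbers : Int) : List Int :=
  let N : Int :=
    if PySem.Int.mod n_numbers 2 = 0 then PySem.Int.floordiv n_numbers 2 * 3
    else (PySem.Int.floordiv n_numbers 2 + 1) * 3
  let fibs := fibonacci_seq_n N
  let res := (PySem.List.pyRange 1 (N + 1) 1).foldl
    (fun res n =>
      if ¬ (PySem.Int.mod n 3 = 0) then res ++ [(PySem.List.pyGet? fibs (n - 1)).getD 0]
      else res) []
  PySem.List.slice res none (some n_numbers)

-- ===== PORT B =====
-- the `while len(res) < n_numbers` loop of Source B
def oddFibLoop (n_numbers : Int) (a b : Int) (res : List Int) : List Int :=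
  if h : (res.length : Int) < n_numbers then
    let res1 := res ++ [a]
    let res2 := if (res1.length : Int) < n_numbers then res1 ++ [b] else res1
    oddFibLoop n_numbers (a + 2 * b) (2 * a + 3 * b) res2
  else res
termination_by (n_numbers - res.length).toNat
decreasing_by
  split <;> simp <;> omega

def odd_fibonacci_numbers_alt (n_numbers : Int) : List Int :=
  oddFibLoop n_numbers 1 1 []

-- ===== PRECONDITION & SPEC =====
def Spec_odd_fibonacci_numbers (n_numbers : Int) (out : List Int) : Prop := out = odd_fibonacci_numbers_alt n_numbers
instance (n_numbers : Int) (out : List Int) : Decidable (Spec_odd_fibonacci_numbers n_numbers out) := by unfold Spec_odd_fibonacci_numbers; infer_instance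

-- ===== CLAIM (what is proved, stated in full; the proofs are below) =====
def Claim_equal_odd_fibonacci_numbers : Prop := ∀ (n_numbers : Int), Dom_odd_fibonacci_numbers n_numbers → Spec_odd_fibonacci_numbers n_numbers (odd_fibonacci_numbers n_numbers)

-- ===== LEMMAS AND PROOFS =====

-- the first t odd Fibonacci numbers starting from the adjacent odd pair (a, b)
def oddTake : Nat → Int → Int → List Int
  | 0, _, _ => []
  | 1, a, _ => [a]
  | (k+2), a, b => a :: b :: oddTake k (a + 2 * b) (2 * a + 3 * b)

-- the plain Fibonacci list of length k starting from the pair (a, b)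
def fibListAux : Nat → Int → Int → List Int
  | 0, _, _ => []
  | (k+1), a, b => a :: fibListAux k b (a + b)

theorem oddFibLoop_eq (n : Int) (a b : Int) (res : List Int) :
    oddFibLoop n a b res = res ++ oddTake (n - res.length).toNat a b := by
  fun_induction oddFibLoop n a b res with
  | case1 a b res h res1 res2 ih =>
    rw [ih]
    by_cases h1 : ((res ++ [a]).length : Int) < n
    · have hres2 : res2 = (res ++ [a]) ++ [b] := by
        simp only [res2, res1]; rw [dif_pos h1]
      have h2 : 2 ≤ (n - res.length).toNat := by simp at h1 ⊢; omega
      obtain ⟨k, hk⟩ : ∃ k, (n - res.length).toNat = k + 2 :=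
        ⟨(n - res.length).toNat - 2, by omega⟩
      have h3 : (n - (res2.length : Int)).toNat = k := by rw [hres2]; simp; omega
      rw [h3, hk, hres2, oddTake]
      simp
    · have hres2 : res2 = res ++ [a] := by
        simp only [res2, res1]; rw [dif_neg h1]
      have h2 : (n - res.length).toNat = 1 := by simp at h1 ⊢; omega
      have h3 : (n - (res2.length : Int)).toNat = 0 := by rw [hres2]; simp at h1 ⊢; omega
      rw [h3, h2, hres2, oddTake, oddTake]
      simp
  | case2 a b res h =>
    have : (n - res.length).toNat = 0 := by omega
    rw [this, oddTake]
    simp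

theorem fib_fold_eq (l : List Int) (L : List Int) (a b : Int) :
    l.foldl
      (fun fibs _i =>
        fibs ++ [(PySem.List.pyGet? fibs (-1)).getD 0 + (PySem.List.pyGet? fibs (-2)).getD 0])
      (L ++ [a, b])
    = L ++ fibListAux (l.length + 2) a b := by
  induction l generalizing L a b with
  | nil => simp [fibListAux]
  | cons x l ih =>
    have e1 : PySem.List.pyGet? (L ++ [a, b]) (-1) = some b := by
      have h : L ++ [a, b] = (L ++ [a]) ++ [b] := by simp
      rw [h, PySem.List.pyGet?_neg_one_append_singleton]
    have e2 : PySem.List.pyGet? (L ++ [a, b]) (-2) = some a := by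
      rw [PySem.List.pyGet?_neg_ofNat (L ++ [a, b]) 2 (by omega) (by simp)]
      simp
    simp only [List.foldl_cons, e1, e2, Option.getD_some]
    have hst : (L ++ [a, b]) ++ [b + a] = (L ++ [a]) ++ [b, a + b] := by
      rw [Int.add_comm b a]; simp
    rw [hst, ih]
    simp [fibListAux]

theorem fibonacci_seq_n_eq (N : Int) (hN : 3 ≤ N) :
    fibonacci_seq_n N = fibListAux N.toNat 1 1 := by
  unfold fibonacci_seq_n
  rw [if_neg (by omega), if_neg (by omega)]
  have h : ([1, 1] : List Int) = [] ++ [1, 1] := by simp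
  rw [h, fib_fold_eq]
  have hl : (PySem.List.pyRange 2 N 1).length = (N - 2).toNat :=
    PySem.List.length_pyRange_one 2 N
  rw [hl]
  have : (N - 2).toNat + 2 = N.toNat := by omega
  rw [this]
  simp

theorem fibListAux_triple (k : Nat) (a b : Int) :
    fibListAux (k + 3) a b = a :: b :: (a + b) :: fibListAux k (a + 2 * b) (2 * a + 3 * b) := by
  rw [show k + 3 = k + 2 + 1 from rfl, fibListAux, show k + 2 = k + 1 + 1 from rfl,
      fibListAux, fibListAux]
  have h1 : b + (a + b) = a + 2 * b := by ring
  have h2 : a + b + (a + 2 * b) = 2 * a + 3 * b := by ring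
  rw [h1, h2]

theorem res_fold_eq (fibs : List Int) : ∀ (m s : Nat) (a b : Int) (acc : List Int),
    fibs.drop (3 * s) = fibListAux (3 * m) a b →
    (PySem.List.pyRange (3 * (s : Int) + 1) (3 * (s : Int) + 3 * (m : Int) + 1) 1).foldl
      (fun res n =>
        if ¬ (PySem.Int.mod n 3 = 0) then res ++ [(PySem.List.pyGet? fibs (n - 1)).getD 0]
        else res) acc
    = acc ++ oddTake (2 * m) a b := by
  intro m
  induction m with
  | zero =>
    intro s a b acc _
    rw [PySem.List.pyRange_one_eq_nil (by push_cast; omega)]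
    simp [oddTake]
  | succ m ih =>
    intro s a b acc hdrop
    rw [show 3 * (m + 1) = 3 * m + 3 from by ring, fibListAux_triple] at hdrop
    have e0 : (PySem.List.pyGet? fibs (3 * (s : Int) + 1 - 1)).getD 0 = a := by
      rw [show 3 * (s : Int) + 1 - 1 = ((3 * s : Nat) : Int) from by push_cast; ring]
      rw [PySem.List.pyGet?_natCast]
      have h : fibs[3 * s]? = (fibs.drop (3 * s))[0]? := by
        rw [List.getElem?_drop]; norm_num
      rw [h, hdrop]
      rfl
    have e1 : (PySem.List.pyGet? fibs (3 * (s : Int) + 2 - 1)).getD 0 = b := by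
      rw [show 3 * (s : Int) + 2 - 1 = ((3 * s + 1 : Nat) : Int) from by push_cast; ring]
      rw [PySem.List.pyGet?_natCast]
      have h : fibs[3 * s + 1]? = (fibs.drop (3 * s))[1]? := by
        rw [List.getElem?_drop]
      rw [h, hdrop]
      rfl
    rw [PySem.List.pyRange_one_cons (by push_cast; omega)]
    rw [show 3 * (s : Int) + 1 + 1 = 3 * (s : Int) + 2 from by ring]
    rw [PySem.List.pyRange_one_cons (by push_cast; omega)]
    rw [show 3 * (s : Int) + 2 + 1 = 3 * (s : Int) + 3 from by ring]
    rw [PySem.List.pyRange_one_cons (by push_cast; omega)]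
    simp only [List.foldl_cons, e0, e1]
    rw [if_neg (by simp), if_pos (by simp), if_pos (by simp)]
    have hd : fibs.drop (3 * (s + 1)) = fibListAux (3 * m) (a + 2 * b) (2 * a + 3 * b) := by
      rw [show 3 * (s + 1) = 3 * s + 3 from by ring, ← List.drop_drop, hdrop]
      rfl
    have key := ih (s + 1) (a + 2 * b) (2 * a + 3 * b) (acc ++ [a] ++ [b]) hd
    rw [show 2 * (m + 1) = 2 * m + 2 from by ring, oddTake]
    push_cast at key ⊢
    ring_nf at key ⊢
    rw [key]
    simp


theorem oddTake_take : ∀ (t k : Nat) (a b : Int), k ≤ t →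
    (oddTake t a b).take k = oddTake k a b := by
  intro t
  induction t using Nat.strong_induction_on with
  | _ t ih =>
    intro k a b hk
    match t, k, hk with
    | _, 0, _ => simp [oddTake]
    | 0, m + 1, hk => exact absurd hk (by omega)
    | 1, 1, _ => simp [oddTake]
    | 1, m + 2, hk => exact absurd hk (by omega)
    | n + 2, 1, _ => simp [oddTake]
    | n + 2, m + 2, hk =>
      show (oddTake (n + 2) a b).take (m + 2) = oddTake (m + 2) a b
      rw [oddTake, oddTake]
      simp only [List.take_succ_cons]
      rw [ih n (by omega) m (a + 2 * b) (2 * a + 3 * b) (by omega)]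

theorem main_pos (n : Int) (hn : 1 ≤ n) :
    odd_fibonacci_numbers n = oddFibLoop n 1 1 [] := by
  rw [oddFibLoop_eq]
  have h0 : (n - (([] : List Int).length : Int)).toNat = n.toNat := by simp
  rw [h0]
  simp only [odd_fibonacci_numbers]
  have hq := PySem.Int.floordiv_mul_add_mod n 2
  have hr0 := PySem.Int.mod_nonneg n (by omega : (0:Int) < 2)
  have hr1 := PySem.Int.mod_lt n (by omega : (0:Int) < 2)
  set N : Int := if PySem.Int.mod n 2 = 0 then PySem.Int.floordiv n 2 * 3
    else (PySem.Int.floordiv n 2 + 1) * 3 with hN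
  obtain ⟨m, hNm, hm1, hnm⟩ :
      ∃ m : Nat, N = 3 * (m : Int) ∧ 1 ≤ (m : Int) ∧ n.toNat ≤ 2 * m := by
    rw [hN]; split
    · exact ⟨(PySem.Int.floordiv n 2).toNat, by omega, by omega, by omega⟩
    · exact ⟨(PySem.Int.floordiv n 2 + 1).toNat, by omega, by omega, by omega⟩
  have hfib : fibonacci_seq_n N = fibListAux (3 * m) 1 1 := by
    rw [fibonacci_seq_n_eq N (by omega)]
    congr 1
    omega
  rw [hfib]
  have hres := res_fold_eq (fibListAux (3 * m) 1 1) m 0 1 1 [] (by simp)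
  have hb : PySem.List.pyRange (3 * ((0:Nat) : Int) + 1) (3 * ((0:Nat) : Int) + 3 * (m : Int) + 1) 1
      = PySem.List.pyRange 1 (N + 1) 1 := by
    rw [hNm]; norm_num
  rw [hb] at hres
  rw [hres, PySem.List.slice_to _ (by omega : (0:Int) ≤ n)]
  rw [List.nil_append, oddTake_take (2 * m) n.toNat 1 1 hnm]
  simp

theorem main_nonpos (n : Int) (hn : n ≤ 0) :
    odd_fibonacci_numbers n = oddFibLoop n 1 1 [] := by
  rw [oddFibLoop_eq]
  have h0 : (n - (([] : List Int).length : Int)).toNat = 0 := by simp; omega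
  rw [h0, oddTake]
  simp only [odd_fibonacci_numbers]
  have hq := PySem.Int.floordiv_mul_add_mod n 2
  have hr0 : 0 ≤ PySem.Int.mod n 2 := PySem.Int.mod_nonneg n (by omega)
  have hr1 : PySem.Int.mod n 2 < 2 := PySem.Int.mod_lt n (by omega)
  set N : Int := if PySem.Int.mod n 2 = 0 then PySem.Int.floordiv n 2 * 3
    else (PySem.Int.floordiv n 2 + 1) * 3 with hN
  have hNle : N ≤ 0 := by
    rw [hN]; split <;> omega
  rw [PySem.List.pyRange_one_eq_nil (by omega)]
  simp [PySem.List.slice]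

-- ===== VERDICT (by name: the statement is the Claim_ definition above) =====
theorem odd_fibonacci_numbers_spec : Claim_equal_odd_fibonacci_numbers := by
  intro n _
  unfold Spec_odd_fibonacci_numbers odd_fibonacci_numbers_alt
  by_cases hn : n ≤ 0
  · exact main_nonpos n hn
  · exact main_pos n (by omega)
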